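-- pv_equiv track=rewrite | github.com/amorphe-welt/subspace | 1_extract_representations.py | find_token_indices_from_whitespace_span
-- ===== SOURCE A (Python) =====
-- from typing import List, Optional, Dict
--
-- def find_token_indices_from_whitespace_span(sentence: str, search_token: Optional[str], span: Optional[List[int]] = None) -> List[int]:
--     tokens = sentence.split()
--
--     # Case 1: Span is provided (highest priority)
--     if span is not None:
--         if span[1] > len(tokens):
--             raise ValueError(f"Span {span} out of range for sentence with {len(tokens)} tokens")
--         return list(range(span[0], span[1]))
--
--     # Case 2: Span is missing, search for the 'token' string in the split sentence
--     if search_token: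
--         try:
--             # Look for exact match in whitespace-split list
--             idx = tokens.index(search_token)
--             return [idx]
--         except ValueError:
--             # Fallback: Find the first token that contains the search_token string
--             for i, t in enumerate(tokens):
--                 if search_token in t:
--                     return [i]
--             raise ValueError(f"Token '{search_token}' not found in sentence: {sentence}")
--
--     raise ValueError("Both 'span' and 'token' are missing; cannot locate target.")
-- ===== SOURCE B (Python) =====
-- from typing import List, Optional
--
-- def find_token_indices_from_whitespace_span(sentence: str, search_token: Optional[str], span: Optional[List[int]] = None) -> List[int]:
--     tokens = sentence.split()
--     if span is not None:
--         lo, hi = span[0], span[1]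
--         if hi > len(tokens):
--             raise ValueError(f"Span {span} out of range for sentence with {len(tokens)} tokens")
--         return list(range(lo, hi))
--     if not search_token:
--         raise ValueError("Both 'span' and 'token' are missing; cannot locate target.")
--     cands = [(i, t) for i, t in enumerate(tokens) if search_token in t]
--     exact = next((p for p in cands if p[1] == search_token), None)
--     if exact is not None:
--         return [exact[0]]
--     if cands:
--         return [cands[0][0]]
--     raise ValueError(f"Token '{search_token}' not found in sentence: {sentence}")
-- ===== Notes on version B (the rewrite author's own statement) =====
-- stated objective: alternative
-- what changed: Instead of list.index followed by a separate substring-fallback loop, B builds one candidate list of (index, token) pairs whose token contains the needle and then selects the first exact pair from it, falling back to the head of the candidate list.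
import Mathlib
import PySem

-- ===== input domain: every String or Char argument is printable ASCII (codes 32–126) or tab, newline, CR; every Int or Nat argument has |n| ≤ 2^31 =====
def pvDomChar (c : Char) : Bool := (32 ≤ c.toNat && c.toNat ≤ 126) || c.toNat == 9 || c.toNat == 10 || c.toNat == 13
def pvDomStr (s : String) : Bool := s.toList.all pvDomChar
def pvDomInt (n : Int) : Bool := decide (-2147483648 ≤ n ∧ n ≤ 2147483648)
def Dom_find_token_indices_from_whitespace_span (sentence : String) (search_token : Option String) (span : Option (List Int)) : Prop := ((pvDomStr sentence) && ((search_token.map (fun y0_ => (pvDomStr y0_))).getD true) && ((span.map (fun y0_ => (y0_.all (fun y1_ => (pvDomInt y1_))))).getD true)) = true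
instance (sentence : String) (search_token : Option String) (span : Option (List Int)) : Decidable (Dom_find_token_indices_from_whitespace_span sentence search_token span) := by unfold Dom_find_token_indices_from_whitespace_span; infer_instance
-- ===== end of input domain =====

-- B replaces A's list.index-then-fallback-loop search by one candidate list of (index, token) pairs containing the needle, picking the first exact pair else the head; same results.


-- ===== PORT A =====
-- A's fallback loop: first token containing t (enumerate from index i); [] where Python raises ValueError (excluded by Pre_)
def pvFirstContains (t : String) (i : Int) : List String → List Int
  | [] => []
  | tok :: rest => if PySem.Str.isIn t tok then [i] else pvFirstContains t (i + 1) rest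

def find_token_indices_from_whitespace_span (sentence : String) (search_token : Option String) (span : Option (List Int)) : List Int :=
  let tokens := PySem.Str.split₀ sentence
  match span with
  | some sp =>
    match PySem.List.pyGet? sp 1 with
    | none => []                                   -- IndexError (excluded by Pre_)
    | some b =>
      if b > (tokens.length : Int) then []         -- ValueError (excluded by Pre_)
      else
        match PySem.List.pyGet? sp 0 with
        | none => []                               -- IndexError (excluded by Pre_)
        | some a => PySem.List.pyRange a b 1
  | none =>
    match search_token with
    | some t =>
      if t ≠ "" then
        match PySem.List.index? tokens t with
        | some idx => [(idx : Int)]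
        | none => pvFirstContains t 0 tokens
      else []                                      -- final ValueError (excluded by Pre_)
    | none => []                                   -- final ValueError (excluded by Pre_)

-- ===== PORT B =====
def find_token_indices_from_whitespace_span_alt (sentence : String) (search_token : Option String) (span : Option (List Int)) : List Int :=
  let tokens := PySem.Str.split₀ sentence
  match span with
  | some sp =>
    match PySem.List.pyGet? sp 0, PySem.List.pyGet? sp 1 with
    | some lo, some hi =>
      if hi > (tokens.length : Int) then [] else PySem.List.pyRange lo hi 1
    | _, _ => []                                   -- IndexError (excluded by Pre_)
  | none =>
    match search_token with
    | none => []                                   -- "both missing" ValueError (excluded by Pre_)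
    | some t =>
      if t = "" then []                            -- "both missing" ValueError (excluded by Pre_)
      else
        let cands := (PySem.List.enumerate tokens 0).filter (fun p => PySem.Str.isIn t p.2)
        match cands.find? (fun p => p.2 == t) with
        | some p => [p.1]
        | none =>
          match cands.head? with
          | some p => [p.1]
          | none => []                             -- "not found" ValueError (excluded by Pre_)

-- ===== PRECONDITION & SPEC =====
-- Pre_ is exactly where the Python returns: with a span, it has ≥ 2 elements and span[1] ≤ len(tokens);
-- without one, search_token is a nonempty string occurring as a substring of some token (else ValueError).
def Pre_find_token_indices_from_whitespace_span (sentence : String) (search_token : Option String) (span : Option (List Int)) : Prop :=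
  (match span with
  | some sp => decide (2 ≤ sp.length) && decide (PySem.List.pyGetD sp 1 0 ≤ ((PySem.Str.split₀ sentence).length : Int))
  | none =>
    match search_token with
    | some t => !(t == "") && (PySem.Str.split₀ sentence).any (fun tok => PySem.Str.isIn t tok)
    | none => false) = true
instance (sentence : String) (search_token : Option String) (span : Option (List Int)) : Decidable (Pre_find_token_indices_from_whitespace_span sentence search_token span) := by unfold Pre_find_token_indices_from_whitespace_span; infer_instance

def pvWitness_find_token_indices_from_whitespace_span : String × Option String × Option (List Int) := ("a ab c", some "b", none)

def Spec_find_token_indices_from_whitespace_span (sentence : String) (search_token : Option String) (span : Option (List Int)) (out : List Int) : Prop := out = find_token_indices_from_whitespace_span_alt sentence search_token span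
instance (sentence : String) (search_token : Option String) (span : Option (List Int)) (out : List Int) : Decidable (Spec_find_token_indices_from_whitespace_span sentence search_token span out) := by unfold Spec_find_token_indices_from_whitespace_span; infer_instance

-- ===== CLAIM (what is proved, stated in full; the proofs are below) =====
def Claim_equal_find_token_indices_from_whitespace_span : Prop := ∀ (sentence : String) (search_token : Option String) (span : Option (List Int)), Dom_find_token_indices_from_whitespace_span sentence search_token span → Pre_find_token_indices_from_whitespace_span sentence search_token span → Spec_find_token_indices_from_whitespace_span sentence search_token span (find_token_indices_from_whitespace_span sentence search_token span)

-- ===== LEMMAS AND PROOFS =====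

-- "t in t" always holds in Python.
theorem pvIsIn_self (t : String) : PySem.Str.isIn t t = true := by
  rw [PySem.Str.isIn_iff_infix]

-- B's first exact candidate is A's list.index result (shifted by the enumerate start).
theorem pvFind_eq_index (t : String) (toks : List String) : ∀ n : Int,
    (((PySem.List.enumerate toks n).filter (fun p => PySem.Str.isIn t p.2)).find?
        (fun p => p.2 == t)) = (PySem.List.index? toks t).map (fun j => (n + j, t)) := by
  induction toks with
  | nil => intro n; simp
  | cons tok rest ih =>
    intro n
    rw [PySem.List.enumerate_cons]
    by_cases h : tok = t
    · subst h
      rw [PySem.List.index?_cons_self,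
        List.filter_cons_of_pos (by simpa using pvIsIn_self _),
        List.find?_cons_of_pos (by simp)]
      simp
    · rw [PySem.List.index?_cons_of_ne rest h]
      by_cases hc : PySem.Str.isIn t tok = true
      · rw [List.filter_cons_of_pos (by simpa using hc), List.find?_cons_of_neg (by simp [h]),
          ih (n + 1)]
        cases hidx : PySem.List.index? rest t with
        | none => simp
        | some j => simp; omega
      · rw [List.filter_cons_of_neg (by simpa using hc), ih (n + 1)]
        cases hidx : PySem.List.index? rest t with
        | none => simp
        | some j => simp; omega

-- The head of B's candidate list is A's fallback loop result.
theorem pvHead_eq_firstContains (t : String) (toks : List String) : ∀ n : Int,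
    (match ((PySem.List.enumerate toks n).filter (fun p => PySem.Str.isIn t p.2)).head? with
      | some p => [p.1]
      | none => ([] : List Int)) = pvFirstContains t n toks := by
  induction toks with
  | nil => intro n; simp [PySem.List.enumerate_nil, pvFirstContains]
  | cons tok rest ih =>
    intro n
    rw [PySem.List.enumerate_cons, pvFirstContains]
    by_cases hc : PySem.Str.isIn t tok = true
    · rw [List.filter_cons_of_pos (by simpa using hc), if_pos hc]
      simp
    · rw [List.filter_cons_of_neg (by simpa using hc), if_neg hc, ih (n + 1)]

-- ===== VERDICT (by name: the statement is the Claim_ definition above) =====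
theorem find_token_indices_from_whitespace_span_spec : Claim_equal_find_token_indices_from_whitespace_span := by
  intro sentence search_token span _ hpre
  unfold Spec_find_token_indices_from_whitespace_span
  unfold find_token_indices_from_whitespace_span find_token_indices_from_whitespace_span_alt
  cases span with
  | some sp =>
    simp only [Pre_find_token_indices_from_whitespace_span, Bool.and_eq_true, decide_eq_true_eq] at hpre
    obtain ⟨hlen, _⟩ := hpre
    have h0 := PySem.List.pyGet?_ofNat (xs := sp) 0 (by omega)
    have h1 := PySem.List.pyGet?_ofNat (xs := sp) 1 (by omega)
    simp only [Nat.cast_zero] at h0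
    simp only [Nat.cast_one] at h1
    simp only [h0, h1]
  | none =>
    cases search_token with
    | none => exact absurd hpre (by simp [Pre_find_token_indices_from_whitespace_span])
    | some t =>
      simp only [Pre_find_token_indices_from_whitespace_span, Bool.and_eq_true,
        Bool.not_eq_true', beq_eq_false_iff_ne, ne_eq] at hpre
      obtain ⟨hne, _⟩ := hpre
      simp only
      rw [if_neg hne, if_pos hne, pvFind_eq_index]
      cases hidx : PySem.List.index? (PySem.Str.split₀ sentence) t with
      | some j => simp
      | none => exact (pvHead_eq_firstContains t _ 0).symm
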